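-- pv_equiv track=rewrite | github.com/SwastikMajumder/math_ai | physics.py | find_polygon
-- ===== SOURCE A (Python) =====
-- def find_polygon(lines, curr_point, history, i_hist):
--     tmp = None
--     for i in range(len(lines)):
--         if curr_point in lines[i]:
--             for j in range(len(lines[i])):
--                 if curr_point == lines[i][j]:
--                     if j+1 != len(lines[i]):
--                         if lines[i][j+1] not in history:
--                             tmp = find_polygon(lines, lines[i][j+1], history + [curr_point], i_hist + [i])
--                             if tmp is not None:
--                                 return tmp + [curr_point]
--                         elif history[0]==lines[i][j+1] and len(set(i_hist)) > 1:
--                             return [curr_point]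
--                     if j-1 != -1:
--                         if lines[i][j-1] not in history:
--                             tmp = find_polygon(lines, lines[i][j-1], history + [curr_point], i_hist + [i])
--                             if tmp is not None:
--                                 return tmp + [curr_point]
--                         elif history[0]==lines[i][j-1] and len(set(i_hist)) > 1:
--                             return [curr_point]
--     return None
-- ===== SOURCE B (Python) =====
-- def find_polygon(lines, curr_point, history, i_hist):
--     # Build a point -> [(neighbor, line_index), ...] adjacency index once,
--     # then DFS over the index instead of rescanning every line at each level.
--     adj = {}
--     for i, line in enumerate(lines):
--         n = len(line)
--         for j, pt in enumerate(line):
--             nbrs = []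
--             if j + 1 < n:
--                 nbrs.append((line[j + 1], i))
--             if j > 0:
--                 nbrs.append((line[j - 1], i))
--             adj[pt] = adj.get(pt, []) + nbrs
--     return _fp_dfs(adj, curr_point, history, i_hist)
--
--
-- def _fp_dfs(adj, curr, history, i_hist):
--     for nbr, i in adj.get(curr, []):
--         if nbr not in history:
--             tmp = _fp_dfs(adj, nbr, history + [curr], i_hist + [i])
--             if tmp is not None:
--                 return tmp + [curr]
--         elif history[0] == nbr and len(set(i_hist)) > 1:
--             return [curr]
--     return None
-- ===== Notes on version B (the rewrite author's own statement) =====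
-- stated objective: alternative
-- what changed: B builds a point-to-(neighbor, line-index) adjacency map in one scan of all lines and the DFS then iterates over adj[curr] at each level, instead of A's rescan of every line and every position at every recursion step; candidate order (line index ascending, position ascending, forward then backward) is preserved exactly.
import Mathlib
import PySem

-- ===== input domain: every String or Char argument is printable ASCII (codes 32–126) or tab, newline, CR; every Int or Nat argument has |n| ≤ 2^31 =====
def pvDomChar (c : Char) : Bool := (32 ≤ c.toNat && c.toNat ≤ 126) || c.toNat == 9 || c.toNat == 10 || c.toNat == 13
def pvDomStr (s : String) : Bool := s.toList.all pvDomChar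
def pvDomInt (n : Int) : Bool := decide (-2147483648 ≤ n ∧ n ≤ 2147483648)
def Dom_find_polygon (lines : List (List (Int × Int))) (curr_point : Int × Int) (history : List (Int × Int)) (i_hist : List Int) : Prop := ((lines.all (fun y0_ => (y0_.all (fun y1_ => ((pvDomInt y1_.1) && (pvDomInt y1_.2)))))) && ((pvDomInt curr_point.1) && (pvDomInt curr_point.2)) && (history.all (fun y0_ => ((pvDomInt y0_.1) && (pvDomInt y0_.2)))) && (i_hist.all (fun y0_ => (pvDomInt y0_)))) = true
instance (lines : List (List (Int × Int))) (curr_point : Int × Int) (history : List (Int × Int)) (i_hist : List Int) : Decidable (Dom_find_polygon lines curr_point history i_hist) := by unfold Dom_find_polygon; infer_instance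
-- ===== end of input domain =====

-- B replaces A's per-recursion rescan of all lines with an adjacency index (point -> neighbor candidates) built once.
-- Both ports carry the same fuel parameter (2*|all points|+2, a bound on the Python DFS depth) purely as a
-- totality guard; the equivalence is proved for every fuel value.

-- fuel bound shared by both ports (totality guard only; covers the Python DFS depth)
def fpFuel (lines : List (List (Int × Int))) : Nat := 2 * lines.flatten.length + 2

-- ===== PORT A =====
mutual
def fpGoA (fuel : Nat) (lines : List (List (Int × Int))) (curr : Int × Int)
    (history : List (Int × Int)) (i_hist : List Int) : Option (List (Int × Int)) :=
  match fuel with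
  | 0 => none
  | f + 1 => fpLoopIA f lines curr history i_hist (PySem.List.enumerate lines)
termination_by (fuel, 0, 0)

-- 'for i in range(len(lines)): if curr_point in lines[i]: …'
def fpLoopIA (f : Nat) (lines : List (List (Int × Int))) (curr : Int × Int)
    (history : List (Int × Int)) (i_hist : List Int)
    (rem : List (Int × List (Int × Int))) : Option (List (Int × Int)) :=
  match rem with
  | [] => none
  | (i, line) :: rest =>
    if curr ∈ line then
      match fpLoopJA f lines curr history i_hist i line (PySem.List.enumerate line) with
      | some v => some v
      | none => fpLoopIA f lines curr history i_hist rest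
    else fpLoopIA f lines curr history i_hist rest
termination_by (f, 3, rem.length)

-- 'for j in range(len(lines[i])): if curr_point == lines[i][j]: …' (forward try, then backward try)
def fpLoopJA (f : Nat) (lines : List (List (Int × Int))) (curr : Int × Int)
    (history : List (Int × Int)) (i_hist : List Int) (i : Int) (line : List (Int × Int))
    (rem : List (Int × (Int × Int))) : Option (List (Int × Int)) :=
  match rem with
  | [] => none
  | (j, pt) :: rest =>
    if pt = curr then
      match (match PySem.List.pyGet? line (j + 1) with
             | some p => fpTryA f lines curr history i_hist i p
             | none => none) with
      | some v => some v
      | none =>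
        match (if j = 0 then none else
               match PySem.List.pyGet? line (j - 1) with
               | some p => fpTryA f lines curr history i_hist i p
               | none => none) with
        | some v => some v
        | none => fpLoopJA f lines curr history i_hist i line rest
    else fpLoopJA f lines curr history i_hist i line rest
termination_by (f, 2, rem.length)

-- one candidate neighbor: recurse if unseen, else the history[0]/set(i_hist) cycle test
def fpTryA (f : Nat) (lines : List (List (Int × Int))) (curr : Int × Int)
    (history : List (Int × Int)) (i_hist : List Int) (i : Int) (p : Int × Int) :
    Option (List (Int × Int)) :=
  if p ∉ history then
    match fpGoA f lines p (history ++ [curr]) (i_hist ++ [i]) with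
    | some tmp => some (tmp ++ [curr])
    | none => none
  else if history.head? = some p ∧ (PySem.Set.ofList i_hist).length > 1 then some [curr]
  else none
termination_by (f, 1, 0)
end

def find_polygon (lines : List (List (Int × Int))) (curr_point : Int × Int) (history : List (Int × Int)) (i_hist : List Int) : Option (List (Int × Int)) :=
  fpGoA (fpFuel lines) lines curr_point history i_hist

-- ===== PORT B =====
-- neighbor entries contributed at position j of line i: forward (j+1) then backward (j-1)
def fpNbrs (line : List (Int × Int)) (i j : Int) : List ((Int × Int) × Int) :=
  (match PySem.List.pyGet? line (j + 1) with
   | some p => [(p, i)]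
   | none => []) ++
  (if j = 0 then []
   else match PySem.List.pyGet? line (j - 1) with
        | some p => [(p, i)]
        | none => [])

-- 'for j, pt in enumerate(line): adj[pt] = adj.get(pt, []) + nbrs'
def fpAddLine (adj : PySem.Dict (Int × Int) (List ((Int × Int) × Int))) (i : Int)
    (line : List (Int × Int)) : PySem.Dict (Int × Int) (List ((Int × Int) × Int)) :=
  (PySem.List.enumerate line).foldl
    (fun adj jp => adj.modify jp.2 [] (· ++ fpNbrs line i jp.1)) adj

-- 'for i, line in enumerate(lines): …'
def fpBuildAdj (lines : List (List (Int × Int))) :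
    PySem.Dict (Int × Int) (List ((Int × Int) × Int)) :=
  (PySem.List.enumerate lines).foldl (fun adj il => fpAddLine adj il.1 il.2) PySem.Dict.empty

mutual
def fpGoB (fuel : Nat) (adj : PySem.Dict (Int × Int) (List ((Int × Int) × Int)))
    (curr : Int × Int) (history : List (Int × Int)) (i_hist : List Int) :
    Option (List (Int × Int)) :=
  match fuel with
  | 0 => none
  | f + 1 => fpLoopB f adj curr history i_hist (adj.getD curr [])
termination_by (fuel, 0)

-- 'for nbr, i in adj.get(curr, []): …'
def fpLoopB (f : Nat) (adj : PySem.Dict (Int × Int) (List ((Int × Int) × Int)))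
    (curr : Int × Int) (history : List (Int × Int)) (i_hist : List Int)
    (es : List ((Int × Int) × Int)) : Option (List (Int × Int)) :=
  match es with
  | [] => none
  | (nbr, i) :: rest =>
    if nbr ∉ history then
      match fpGoB f adj nbr (history ++ [curr]) (i_hist ++ [i]) with
      | some tmp => some (tmp ++ [curr])
      | none => fpLoopB f adj curr history i_hist rest
    else if history.head? = some nbr ∧ (PySem.Set.ofList i_hist).length > 1 then some [curr]
    else fpLoopB f adj curr history i_hist rest
termination_by (f, 1 + es.length)
end

def find_polygon_alt (lines : List (List (Int × Int))) (curr_point : Int × Int) (history : List (Int × Int)) (i_hist : List Int) : Option (List (Int × Int)) :=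
  fpGoB (fpFuel lines) (fpBuildAdj lines) curr_point history i_hist

-- ===== PRECONDITION & SPEC =====
def Spec_find_polygon (lines : List (List (Int × Int))) (curr_point : Int × Int) (history : List (Int × Int)) (i_hist : List Int) (out : Option (List (Int × Int))) : Prop := out = find_polygon_alt lines curr_point history i_hist
instance (lines : List (List (Int × Int))) (curr_point : Int × Int) (history : List (Int × Int)) (i_hist : List Int) (out : Option (List (Int × Int))) : Decidable (Spec_find_polygon lines curr_point history i_hist out) := by unfold Spec_find_polygon; infer_instance

-- ===== CLAIM (what is proved, stated in full; the proofs are below) =====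
def Claim_equal_find_polygon : Prop := ∀ (lines : List (List (Int × Int))) (curr_point : Int × Int) (history : List (Int × Int)) (i_hist : List Int), Dom_find_polygon lines curr_point history i_hist → Spec_find_polygon lines curr_point history i_hist (find_polygon lines curr_point history i_hist)

-- ===== LEMMAS AND PROOFS =====

-- candidate sequence contributed for key k by one line / by all lines,
-- in A's scan order (i ascending, j ascending, forward then backward)
def fpCandLine (line : List (Int × Int)) (i : Int) (k : Int × Int) : List ((Int × Int) × Int) :=
  (PySem.List.enumerate line).flatMap (fun jp => if jp.2 = k then fpNbrs line i jp.1 else [])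

def fpCand (lines : List (List (Int × Int))) (k : Int × Int) : List ((Int × Int) × Int) :=
  (PySem.List.enumerate lines).flatMap (fun il => fpCandLine il.2 il.1 k)

theorem fpAddLine_getD (line : List (Int × Int)) (i : Int)
    (adj : PySem.Dict (Int × Int) (List ((Int × Int) × Int))) (k : Int × Int) :
    (fpAddLine adj i line).getD k [] = adj.getD k [] ++ fpCandLine line i k := by
  unfold fpAddLine fpCandLine
  generalize PySem.List.enumerate line = l
  induction l generalizing adj with
  | nil => simp
  | cons jp rest ih =>
    simp only [List.foldl_cons, List.flatMap_cons, ih]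
    rw [PySem.Dict.getD_modify]
    by_cases h : jp.2 = k
    · subst h; simp
    · rw [if_neg (fun hk => h hk.symm), if_neg h]; simp

theorem fpBuildAdj_getD (lines : List (List (Int × Int))) (k : Int × Int) :
    (fpBuildAdj lines).getD k [] = fpCand lines k := by
  unfold fpBuildAdj fpCand
  generalize PySem.List.enumerate lines = l
  have main : ∀ (l : List (Int × List (Int × Int)))
      (adj : PySem.Dict (Int × Int) (List ((Int × Int) × Int))),
      (l.foldl (fun adj il => fpAddLine adj il.1 il.2) adj).getD k []
        = adj.getD k [] ++ l.flatMap (fun il => fpCandLine il.2 il.1 k) := by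
    intro l
    induction l with
    | nil => simp
    | cons il rest ih =>
      intro adj
      simp only [List.foldl_cons, List.flatMap_cons, ih, fpAddLine_getD, List.append_assoc]
  simpa using main l PySem.Dict.empty

theorem fpLoopB_append (f : Nat) (adj : PySem.Dict (Int × Int) (List ((Int × Int) × Int)))
    (curr : Int × Int) (history : List (Int × Int)) (i_hist : List Int)
    (xs ys : List ((Int × Int) × Int)) :
    fpLoopB f adj curr history i_hist (xs ++ ys)
      = match fpLoopB f adj curr history i_hist xs with
        | some v => some v
        | none => fpLoopB f adj curr history i_hist ys := by
  induction xs with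
  | nil => simp [fpLoopB]
  | cons e rest ih =>
    obtain ⟨nbr, i⟩ := e
    rw [List.cons_append]
    rw [fpLoopB, fpLoopB]
    by_cases h : nbr ∉ history
    · rw [if_pos h, if_pos h]
      cases fpGoB f adj nbr (history ++ [curr]) (i_hist ++ [i]) with
      | some tmp => rfl
      | none => exact ih
    · rw [if_neg h, if_neg h]
      by_cases hc : history.head? = some nbr ∧ (PySem.Set.ofList i_hist).length > 1
      · rw [if_pos hc, if_pos hc]
      · rw [if_neg hc, if_neg hc]; exact ih

theorem fpCandLine_of_not_mem (line : List (Int × Int)) (i : Int) (k : Int × Int)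
    (h : k ∉ line) : fpCandLine line i k = [] := by
  unfold fpCandLine
  apply List.flatMap_eq_nil_iff.mpr
  intro jp hjp
  rcases (PySem.List.mem_enumerate_iff _ _ _).mp hjp with ⟨m, hm, rfl⟩
  simp only
  rw [if_neg]
  intro he
  exact h (he ▸ List.getElem_mem hm)

-- the single-candidate steps agree, given that the recursive calls agree at fuel f
theorem fpTryA_eq (f : Nat) (lines : List (List (Int × Int)))
    (adj : PySem.Dict (Int × Int) (List ((Int × Int) × Int)))
    (IH : ∀ (c : Int × Int) (h : List (Int × Int)) (ih : List Int),
      fpGoA f lines c h ih = fpGoB f adj c h ih)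
    (curr : Int × Int) (history : List (Int × Int)) (i_hist : List Int) (i : Int)
    (p : Int × Int) :
    fpTryA f lines curr history i_hist i p
      = fpLoopB f adj curr history i_hist [(p, i)] := by
  rw [fpTryA, fpLoopB]
  by_cases h : p ∉ history
  · rw [if_pos h, if_pos h, IH]
    cases fpGoB f adj p (history ++ [curr]) (i_hist ++ [i]) with
    | some tmp => rfl
    | none => simp [fpLoopB]
  · rw [if_neg h, if_neg h]
    by_cases hc : history.head? = some p ∧ (PySem.Set.ofList i_hist).length > 1
    · rw [if_pos hc, if_pos hc]
    · rw [if_neg hc, if_neg hc, fpLoopB]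

theorem fpLoopJA_eq (f : Nat) (lines : List (List (Int × Int)))
    (adj : PySem.Dict (Int × Int) (List ((Int × Int) × Int)))
    (IH : ∀ (c : Int × Int) (h : List (Int × Int)) (ih : List Int),
      fpGoA f lines c h ih = fpGoB f adj c h ih)
    (curr : Int × Int) (history : List (Int × Int)) (i_hist : List Int) (i : Int)
    (line : List (Int × Int)) (rem : List (Int × (Int × Int))) :
    fpLoopJA f lines curr history i_hist i line rem
      = fpLoopB f adj curr history i_hist
          (rem.flatMap (fun jp => if jp.2 = curr then fpNbrs line i jp.1 else [])) := by
  induction rem with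
  | nil => simp [fpLoopJA, fpLoopB]
  | cons jp rest ihrem =>
    obtain ⟨j, pt⟩ := jp
    rw [List.flatMap_cons, fpLoopJA]
    by_cases hpt : pt = curr
    · rw [if_pos hpt]
      have hhead : (if (j, pt).2 = curr then fpNbrs line i (j, pt).1 else [])
          = (match PySem.List.pyGet? line (j + 1) with
             | some p => [(p, i)]
             | none => []) ++
            (if j = 0 then []
             else match PySem.List.pyGet? line (j - 1) with
                  | some p => [(p, i)]
                  | none => []) := by
        simp only [hpt]; rfl
      rw [hhead, List.append_assoc, fpLoopB_append, fpLoopB_append]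
      have fwd : (match PySem.List.pyGet? line (j + 1) with
                  | some p => fpTryA f lines curr history i_hist i p
                  | none => none)
          = fpLoopB f adj curr history i_hist
              (match PySem.List.pyGet? line (j + 1) with
               | some p => [(p, i)]
               | none => []) := by
        cases PySem.List.pyGet? line (j + 1) with
        | some p => exact fpTryA_eq f lines adj IH curr history i_hist i p
        | none => simp [fpLoopB]
      have bwd : (if j = 0 then none else
                  match PySem.List.pyGet? line (j - 1) with
                  | some p => fpTryA f lines curr history i_hist i p
                  | none => none)
          = fpLoopB f adj curr history i_hist
              (if j = 0 then []
               else match PySem.List.pyGet? line (j - 1) with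
                    | some p => [(p, i)]
                    | none => []) := by
        by_cases hj : j = 0
        · simp [hj, fpLoopB]
        · rw [if_neg hj, if_neg hj]
          cases PySem.List.pyGet? line (j - 1) with
          | some p => exact fpTryA_eq f lines adj IH curr history i_hist i p
          | none => simp [fpLoopB]
      rw [fwd, bwd, ihrem]
    · rw [if_neg hpt]
      simp only [if_neg hpt, List.nil_append]
      exact ihrem

theorem fpLoopIA_eq (f : Nat) (lines : List (List (Int × Int)))
    (adj : PySem.Dict (Int × Int) (List ((Int × Int) × Int)))
    (IH : ∀ (c : Int × Int) (h : List (Int × Int)) (ih : List Int),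
      fpGoA f lines c h ih = fpGoB f adj c h ih)
    (curr : Int × Int) (history : List (Int × Int)) (i_hist : List Int)
    (rem : List (Int × List (Int × Int))) :
    fpLoopIA f lines curr history i_hist rem
      = fpLoopB f adj curr history i_hist
          (rem.flatMap (fun il => fpCandLine il.2 il.1 curr)) := by
  induction rem with
  | nil => simp [fpLoopIA, fpLoopB]
  | cons il rest ihrem =>
    obtain ⟨i, line⟩ := il
    rw [List.flatMap_cons, fpLoopIA, fpLoopB_append]
    by_cases hm : curr ∈ line
    · rw [if_pos hm]
      rw [fpLoopJA_eq f lines adj IH curr history i_hist i line (PySem.List.enumerate line)]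
      have : fpCandLine line i curr
          = (PySem.List.enumerate line).flatMap
              (fun jp => if jp.2 = curr then fpNbrs line i jp.1 else []) := rfl
      rw [← this, ihrem]
    · rw [if_neg hm, fpCandLine_of_not_mem line i curr hm]
      simpa [fpLoopB] using ihrem

theorem fpGoA_eq_fpGoB (f : Nat) (lines : List (List (Int × Int)))
    (curr : Int × Int) (history : List (Int × Int)) (i_hist : List Int) :
    fpGoA f lines curr history i_hist
      = fpGoB f (fpBuildAdj lines) curr history i_hist := by
  induction f generalizing curr history i_hist with
  | zero => rw [fpGoA, fpGoB]
  | succ f ihf =>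
    rw [fpGoA, fpGoB, fpBuildAdj_getD]
    exact fpLoopIA_eq f lines (fpBuildAdj lines)
      (fun c h ih => ihf c h ih) curr history i_hist (PySem.List.enumerate lines)

-- ===== VERDICT (by name: the statement is the Claim_ definition above) =====
theorem find_polygon_spec : Claim_equal_find_polygon := by
  intro lines curr_point history i_hist _
  unfold Spec_find_polygon find_polygon find_polygon_alt
  exact fpGoA_eq_fpGoB (fpFuel lines) lines curr_point history i_hist
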